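-- pv_equiv track=rewrite | github.com/Liabaer/Test | web_project/web_api/vaild_check.py | is_en_num
-- ===== SOURCE A (Python) =====
-- def is_en_num(s):
--     flag1 = False
--     flag2 = False
--     for x in s:
--         # 判断是否为纯数字
--         if x.isdigit():
--             flag1 = True
--         # 判断是否为纯字母
--         elif x.isalpha():
--             flag2 = True
--         else:
--             return False
--     if flag1 and flag2:
--         return True
--     return False
-- ===== SOURCE B (Python) =====
-- def is_en_num(s):
--     has_digit = any(c.isdigit() for c in s)
--     has_alpha = any(c.isalpha() for c in s)
--     all_valid = all(c.isdigit() or c.isalpha() for c in s)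
--     return all_valid and has_digit and has_alpha
-- ===== Notes on version B (the rewrite author's own statement) =====
-- stated objective: idiomatic
-- what changed: Replaced the fused early-exit flag-tracking loop with three independent aggregate scans (any isdigit, any isalpha, all valid) combined at the end.
import Mathlib
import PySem

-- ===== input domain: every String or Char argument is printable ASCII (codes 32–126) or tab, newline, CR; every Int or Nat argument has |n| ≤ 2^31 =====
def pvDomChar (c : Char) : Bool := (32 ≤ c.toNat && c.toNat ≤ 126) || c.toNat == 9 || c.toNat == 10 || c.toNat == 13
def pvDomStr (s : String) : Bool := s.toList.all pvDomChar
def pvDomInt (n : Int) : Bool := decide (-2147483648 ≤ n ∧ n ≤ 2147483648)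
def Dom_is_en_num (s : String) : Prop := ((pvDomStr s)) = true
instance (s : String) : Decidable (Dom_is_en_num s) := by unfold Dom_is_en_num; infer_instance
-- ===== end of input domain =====

-- B replaces A's single early-exit flag loop with three independent aggregate scans (idiomatic).

-- ===== PORT A =====
-- A's loop over the characters carrying the two flags, with early return False on an invalid char.
def is_en_num_loop (cs : List Char) (flag1 flag2 : Bool) : Bool :=
  match cs with
  | [] => if flag1 && flag2 then true else false
  | x :: rest =>
    if PySem.Chars.isdigit x then is_en_num_loop rest true flag2
    else if PySem.Chars.isalpha x then is_en_num_loop rest flag1 true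
    else false

def is_en_num (s : String) : Bool := is_en_num_loop s.toList false false

-- ===== PORT B =====
def is_en_num_alt (s : String) : Bool :=
  let has_digit := s.toList.any (fun c => PySem.Chars.isdigit c)
  let has_alpha := s.toList.any (fun c => PySem.Chars.isalpha c)
  let all_valid := s.toList.all (fun c => PySem.Chars.isdigit c || PySem.Chars.isalpha c)
  all_valid && has_digit && has_alpha

-- ===== PRECONDITION & SPEC =====
def Spec_is_en_num (s : String) (out : Bool) : Prop := out = is_en_num_alt s
instance (s : String) (out : Bool) : Decidable (Spec_is_en_num s out) := by unfold Spec_is_en_num; infer_instance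

-- ===== CLAIM (what is proved, stated in full; the proofs are below) =====
def Claim_equal_is_en_num : Prop := ∀ (s : String), Dom_is_en_num s → Spec_is_en_num s (is_en_num s)

-- ===== LEMMAS AND PROOFS =====
theorem dig_not_alpha (c : Char) : PySem.Chars.isdigit c = true → PySem.Chars.isalpha c = false := by
  simp only [PySem.Chars.isdigit, PySem.Chars.isalpha, PySem.Chars.isupper, PySem.Chars.islower,
    Bool.and_eq_true, Bool.or_eq_false_iff, Bool.and_eq_false_iff, decide_eq_true_eq,
    decide_eq_false_iff_not, Char.le_def]
  intro h1
  obtain ⟨ha, hb⟩ := h1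
  simp only [UInt32.le_iff_toNat_le] at *
  have e0 : ('0':Char).val.toNat = 48 := rfl
  have e9 : ('9':Char).val.toNat = 57 := rfl
  have eA : ('A':Char).val.toNat = 65 := rfl
  have ea : ('a':Char).val.toNat = 97 := rfl
  constructor <;> left <;> omega

theorem is_en_num_loop_eq (cs : List Char) (f1 f2 : Bool) :
    is_en_num_loop cs f1 f2 =
      (cs.all (fun c => PySem.Chars.isdigit c || PySem.Chars.isalpha c)
        && (f1 || cs.any (fun c => PySem.Chars.isdigit c))
        && (f2 || cs.any (fun c => PySem.Chars.isalpha c))) := by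
  induction cs generalizing f1 f2 with
  | nil => cases f1 <;> cases f2 <;> simp [is_en_num_loop]
  | cons x rest ih =>
    by_cases hd : PySem.Chars.isdigit x = true
    · have ha := dig_not_alpha x hd
      simp [is_en_num_loop, hd, ha, ih] <;> cases f2 <;> simp
    · by_cases ha : PySem.Chars.isalpha x = true <;>
        simp [is_en_num_loop, hd, ha, ih] <;> cases f1 <;> cases f2 <;> simp

-- ===== VERDICT (by name: the statement is the Claim_ definition above) =====
theorem is_en_num_spec : Claim_equal_is_en_num := by
  intro s _
  unfold Spec_is_en_num is_en_num is_en_num_alt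
  simp [is_en_num_loop_eq]
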